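-- pv_equiv track=rewrite | github.com/Tessa1217/Algorithm-Practice | 프로그래머스/2/72411. 메뉴 리뉴얼/메뉴 리뉴얼.py | solution
-- ===== SOURCE A (Python) =====
-- from itertools import combinations
--
-- def solution(orders, course):
--     answer = []
--     max_course = dict((c, 0) for c in course)
--     menu = dict()
--     # course별로 조합 구하기
--     for menu_cnt in course:
--         for order in orders:
--             if len(order) < menu_cnt:
--                 continue
--             menu_list = list(order)
--             menu_list.sort()
--             for comb in combinations(menu_list, menu_cnt):
--                 menu_str = "".join(comb)
--                 if menu_str not in menu:
--                     menu.setdefault(menu_str, 0)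
--                 menu[menu_str] += 1
--                 max_course[menu_cnt] = max(max_course[menu_cnt], menu[menu_str])
--
--     course_menu = list(k for k, v in menu.items() if v >= 2 and max_course[len(k)] == v)
--     course_menu.sort()
--
--     return course_menu
-- ===== SOURCE B (Python) =====
-- from itertools import combinations
--
-- def solution(orders, course):
--     # sort-then-scan counting: pour every combination string into one flat list,
--     # sort it, and read counts off consecutive runs -- no counting dict at all;
--     # the answer comes out already in lexicographic order from that same sort.
--     pool = []
--     for c in course:
--         for order in orders:
--             if len(order) >= c:
--                 pool.extend(map("".join, combinations(sorted(order), c)))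
--     pool.sort()
--     items = []
--     i, n = 0, len(pool)
--     while i < n:
--         j = i
--         while j < n and pool[j] == pool[i]:
--             j += 1
--         items.append((pool[i], j - i))
--         i = j
--     best = {}
--     for k, v in items:
--         if v > best.get(len(k), 0):
--             best[len(k)] = v
--     return [k for k, v in items if v >= 2 and v == best[len(k)]]
-- ===== Notes on version B (the rewrite author's own statement) =====
-- stated objective: alternative
-- what changed: B replaces A's hash-dict counting with inline running max by a sort-then-scan strategy: all combination strings are poured into one flat list, sorted once, counts are read off consecutive equal runs with an index scan, the per-length maxima are taken from those run pairs, and the answer needs no final sort because the runs are already lexicographic.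
import Mathlib
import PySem

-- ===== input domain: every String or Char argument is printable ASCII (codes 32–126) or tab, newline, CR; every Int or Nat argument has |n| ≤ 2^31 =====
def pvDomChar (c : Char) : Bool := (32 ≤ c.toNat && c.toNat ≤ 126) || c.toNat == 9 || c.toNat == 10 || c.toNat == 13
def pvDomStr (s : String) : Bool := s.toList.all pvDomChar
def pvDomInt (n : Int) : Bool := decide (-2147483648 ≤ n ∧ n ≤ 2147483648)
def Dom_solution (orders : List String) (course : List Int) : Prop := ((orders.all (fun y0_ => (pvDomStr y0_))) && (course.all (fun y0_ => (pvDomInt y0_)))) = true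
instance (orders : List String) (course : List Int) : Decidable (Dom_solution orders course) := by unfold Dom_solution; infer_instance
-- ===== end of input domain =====

-- B replaces A's dict counting with inline running max by sort-then-scan: all combination
-- strings go into one flat list, one sort, counts read off consecutive equal runs by an index
-- scan, per-length maxima from the run pairs, and no final sort (runs are already in order).

-- ===== PORT A =====
def solution (orders : List String) (course : List Int) : List String :=
  -- max_course = dict((c, 0) for c in course)
  let max_course0 : PySem.Dict Int Int := course.foldl (fun d c => d.insert c 0) PySem.Dict.empty
  let st :=
    course.foldl (fun (st : PySem.Dict String Int × PySem.Dict Int Int) menu_cnt =>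
      orders.foldl (fun st order =>
        if PySem.Str.len order < menu_cnt then st
        else
          let menu_list := PySem.List.sorted order.toList (fun x => x)
          (PySem.List.combinations menu_list menu_cnt.toNat).foldl (fun st comb =>
            let menu_str := String.ofList comb
            let menu := if st.1.contains menu_str then st.1 else st.1.setdefault menu_str 0
            let menu := menu.insert menu_str (menu.getD menu_str 0 + 1)
            -- max_course[menu_cnt] read: the key is always present (inserted at init); getD is the total port
            let mc := st.2.insert menu_cnt (max (st.2.getD menu_cnt 0) (menu.getD menu_str 0))
            (menu, mc)) st) st)
      (PySem.Dict.empty, max_course0)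
  let course_menu := st.1.items.filterMap (fun p =>
    -- max_course[len(k)] read: len(k) is always a course value already in max_course
    if 2 ≤ p.2 ∧ st.2.getD (PySem.Str.len p.1) 0 = p.2 then some p.1 else none)
  PySem.List.sorted course_menu (fun x => x)

-- ===== PORT B =====
-- the index while-loops 'advance j while pool[j] == pool[i], emit (pool[i], j-i), continue at j'
-- ported as the obvious structural recursion on the remaining suffix (exact)
def pvRunScan : List String → List (String × Int)
  | [] => []
  | x :: xs =>
      (x, ((xs.takeWhile (fun y => y == x)).length : Int) + 1) :: pvRunScan (xs.dropWhile (fun y => y == x))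
  termination_by l => l.length
  decreasing_by simpa using Nat.lt_succ_of_le (List.length_dropWhile_le _ _)

def solution_alt (orders : List String) (course : List Int) : List String :=
  let pool : List String :=
    course.foldl (fun pool c =>
      orders.foldl (fun pool order =>
        if c ≤ PySem.Str.len order then
          pool ++ (PySem.List.combinations (PySem.List.sorted order.toList (fun x => x)) c.toNat).map String.ofList
        else pool) pool) []
  let pool := PySem.List.sorted pool (fun x => x)
  let items := pvRunScan pool
  let best :=
    items.foldl (fun (best : PySem.Dict Int Int) p =>
      if best.getD (PySem.Str.len p.1) 0 < p.2 then best.insert (PySem.Str.len p.1) p.2 else best)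
      PySem.Dict.empty
  -- best[len(k)] read: always present (every run key's length got some positive count)
  items.filterMap (fun p : String × Int =>
    if 2 ≤ p.2 ∧ p.2 = best.getD (PySem.Str.len p.1) 0 then some p.1 else none)

-- ===== PRECONDITION & SPEC =====
-- Pre_ excludes only inputs on which both programs raise ValueError: a negative course size
-- reaching itertools.combinations (i.e. any negative course entry when orders is nonempty).
def Pre_solution (orders : List String) (course : List Int) : Prop :=
  orders = [] ∨ ∀ c ∈ course, 0 ≤ c
instance (orders : List String) (course : List Int) : Decidable (Pre_solution orders course) := by
  unfold Pre_solution; infer_instance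
def pvWitness_solution : List String × List Int := (["ABC", "CAB", "AB"], [2, 3])

def Spec_solution (orders : List String) (course : List Int) (out : List String) : Prop := out = solution_alt orders course
instance (orders : List String) (course : List Int) (out : List String) : Decidable (Spec_solution orders course out) := by unfold Spec_solution; infer_instance

-- ===== CLAIM (what is proved, stated in full; the proofs are below) =====
def Claim_equal_solution : Prop := ∀ (orders : List String) (course : List Int), Dom_solution orders course → Pre_solution orders course → Spec_solution orders course (solution orders course)

-- ===== LEMMAS AND PROOFS =====

def pvGen (c : Int) (o : String) : List String :=
  if PySem.Str.len o < c then []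
  else (PySem.List.combinations (PySem.List.sorted o.toList (fun x => x)) c.toNat).map String.ofList

def pvPairs (orders : List String) (course : List Int) : List (Int × String) :=
  course.flatMap (fun c => orders.flatMap (fun o => (pvGen c o).map (fun k => (c, k))))

def pvKeysA (orders : List String) (course : List Int) : List String :=
  (pvPairs orders course).map Prod.snd

def pvMaxAt (keys : List String) (c : Int) : Int :=
  ((PySem.Set.ofList keys).filter (fun k => PySem.Str.len k = c)).foldl
    (fun m k => max m (keys.count k : Int)) 0

def pvStepA (st : PySem.Dict String Int × PySem.Dict Int Int) (p : Int × String) :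
    PySem.Dict String Int × PySem.Dict Int Int :=
  (st.1.insert p.2 (st.1.getD p.2 0 + 1),
   st.2.insert p.1 (max (st.2.getD p.1 0) (st.1.getD p.2 0 + 1)))

def pvStepBest (best : PySem.Dict Int Int) (p : String × Int) : PySem.Dict Int Int :=
  if best.getD (PySem.Str.len p.1) 0 < p.2 then best.insert (PySem.Str.len p.1) p.2 else best

lemma stepA_eq (st : PySem.Dict String Int × PySem.Dict Int Int) (c : Int) (k : String) :
    (let menu := if st.1.contains k then st.1 else st.1.setdefault k 0
     let menu := menu.insert k (menu.getD k 0 + 1)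
     (menu, st.2.insert c (max (st.2.getD c 0) (menu.getD k 0)))) = pvStepA st (c, k) := by
  by_cases h : st.1.contains k
  · simp [h, pvStepA, PySem.Dict.getD_insert_self]
  · have h' : st.1.contains k = false := by simpa using h
    simp only [h, Bool.false_eq_true, if_false, pvStepA,
      PySem.Dict.setdefault_of_not_contains _ _ h', PySem.Dict.getD_insert_self,
      PySem.Dict.insert_insert_self, PySem.Dict.getD_of_not_contains _ _ h']

lemma stateA_eq (orders : List String) (course : List Int) :
    course.foldl (fun (st : PySem.Dict String Int × PySem.Dict Int Int) menu_cnt =>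
      orders.foldl (fun st order =>
        if PySem.Str.len order < menu_cnt then st
        else
          let menu_list := PySem.List.sorted order.toList (fun x => x)
          (PySem.List.combinations menu_list menu_cnt.toNat).foldl (fun st comb =>
            let menu_str := String.ofList comb
            let menu := if st.1.contains menu_str then st.1 else st.1.setdefault menu_str 0
            let menu := menu.insert menu_str (menu.getD menu_str 0 + 1)
            let mc := st.2.insert menu_cnt (max (st.2.getD menu_cnt 0) (menu.getD menu_str 0))
            (menu, mc)) st) st)
      (PySem.Dict.empty, course.foldl (fun d c => d.insert c 0) PySem.Dict.empty)
    = (pvPairs orders course).foldl pvStepA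
        (PySem.Dict.empty, course.foldl (fun d c => d.insert c 0) PySem.Dict.empty) := by
  unfold pvPairs
  rw [List.foldl_flatMap]
  refine PySem.List.foldl_congr_mem _ _ _ _ ?_
  intro st menu_cnt _
  rw [List.foldl_flatMap]
  refine PySem.List.foldl_congr_mem _ _ _ _ ?_
  intro st' order _
  by_cases h : PySem.Str.len order < menu_cnt
  · simp only [pvGen, if_pos h, List.map_nil, List.foldl_nil]
  · simp only [pvGen, if_neg h, List.foldl_map]
    refine PySem.List.foldl_congr_mem _ _ _ _ ?_
    intro acc comb _
    exact stepA_eq acc menu_cnt (String.ofList comb)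

lemma portA_fold (orders : List String) (course : List Int) :
    solution orders course =
      (let st := (pvPairs orders course).foldl pvStepA
          (PySem.Dict.empty, course.foldl (fun d c => d.insert c 0) PySem.Dict.empty)
       PySem.List.sorted (st.1.items.filterMap (fun p =>
         if 2 ≤ p.2 ∧ st.2.getD (PySem.Str.len p.1) 0 = p.2 then some p.1 else none)) (fun x => x)) := by
  unfold solution
  simp only [stateA_eq]

lemma fstA (pairs : List (Int × String)) (st : PySem.Dict String Int × PySem.Dict Int Int) :
    (pairs.foldl pvStepA st).1 = pairs.foldl (fun d p => d.insert p.2 (d.getD p.2 0 + 1)) st.1 := by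
  induction pairs generalizing st with
  | nil => rfl
  | cons p t ih => simpa [pvStepA] using ih _

lemma fstA_counter (pairs : List (Int × String)) (mc : PySem.Dict Int Int) :
    (pairs.foldl pvStepA (PySem.Dict.empty, mc)).1 = PySem.Dict.counter (pairs.map Prod.snd) := by
  rw [fstA, ← PySem.Dict.foldl_insert_getD_add_one_eq_counter, List.foldl_map]

lemma mc0_zero (course : List Int) (c : Int) :
    (course.foldl (fun d c => d.insert c 0) (PySem.Dict.empty : PySem.Dict Int Int)).getD c 0 = 0 := by
  have : ∀ (l : List Int) (d : PySem.Dict Int Int), (∀ c, d.getD c 0 = 0) →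
      ∀ c, (l.foldl (fun d c => d.insert c 0) d).getD c 0 = 0 := by
    intro l
    induction l with
    | nil => intro d h c; exact h c
    | cons x t ih =>
      intro d h c
      refine ih _ (fun c' => ?_) c
      rw [PySem.Dict.getD_insert]
      split <;> simp [h]
  exact this course _ (fun c => PySem.Dict.getD_empty c 0) c

lemma foldlMax_exchange (l : List Int) (a x : Int) : l.foldl max (max a x) = max x (l.foldl max a) := by
  induction l generalizing a with
  | nil => simp [max_comm]
  | cons y t ih => simp only [List.foldl_cons]; rw [show max (max a x) y = max (max a y) x by omega, ih]

lemma foldlMax_middle (l1 l2 : List Int) (x a : Int) :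
    ((l1 ++ x :: l2).foldl max a) = max x ((l1 ++ l2).foldl max a) := by
  rw [List.foldl_append, List.foldl_cons, foldlMax_exchange, List.foldl_append]

lemma foldl_max_count_congr (l keys : List String) (k : String) (hk : k ∉ l) (a : Int) :
    l.foldl (fun m x => max m (((keys ++ [k]).count x : Int))) a
      = l.foldl (fun m x => max m ((keys.count x : Int))) a := by
  refine PySem.List.foldl_congr_mem _ _ _ _ ?_
  intro acc x hx
  have hxk : x ≠ k := fun h => hk (h ▸ hx)
  have : [k].count x = 0 := List.count_eq_zero.mpr (by simp [hxk])
  simp [List.count_append, this]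

lemma maxAt_append (keys : List String) (k : String) (c : Int) :
    pvMaxAt (keys ++ [k]) c =
      if c = PySem.Str.len k then max (pvMaxAt keys c) ((keys.count k : Int) + 1)
      else pvMaxAt keys c := by
  have hS : (PySem.Set.ofList (keys ++ [k]) : List String) =
      if k ∈ keys then PySem.Set.ofList keys else PySem.Set.ofList keys ++ [k] := by
    simp [PySem.Set.ofList_append, PySem.Set.update, PySem.Set.add, PySem.Set.mem_ofList]
  have hcntk : (((keys ++ [k]).count k : Int)) = (keys.count k : Int) + 1 := by
    simp [List.count_append]
  unfold pvMaxAt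
  rw [hS]
  by_cases hmem : k ∈ keys
  · rw [if_pos hmem]
    by_cases hck : c = PySem.Str.len k
    · rw [if_pos hck]
      have hkl : k ∈ (PySem.Set.ofList keys).filter (fun x => PySem.Str.len x = c) := by
        rw [List.mem_filter]
        exact ⟨(PySem.Set.mem_ofList keys k).mpr hmem, by simp [hck]⟩
      obtain ⟨l1, l2, hd⟩ := List.append_of_mem hkl
      have nd : ((PySem.Set.ofList keys).filter (fun x => PySem.Str.len x = c)).Nodup :=
        (PySem.Set.nodup_ofList keys).filter _
      rw [hd] at nd ⊢
      have hknot : k ∉ l1 ++ l2 := by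
        have := (List.nodup_middle.mp nd)
        exact (List.nodup_cons.mp this).1
      rw [← List.foldl_map (f := fun x : String => (((keys ++ [k]).count x : Int))) (g := max),
          ← List.foldl_map (f := fun x : String => ((keys.count x : Int))) (g := max)]
      simp only [List.map_append, List.map_cons]
      rw [foldlMax_middle, foldlMax_middle, ← List.map_append, ← List.map_append,
          List.foldl_map, List.foldl_map, foldl_max_count_congr _ _ _ hknot, hcntk]
      omega
    · rw [if_neg hck]
      refine PySem.List.foldl_congr_mem _ _ _ _ ?_
      intro acc x hx
      have hxk : x ≠ k := by
        rintro rfl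
        have hlx : PySem.Str.len x = c := by simpa using (List.mem_filter.mp hx).2
        exact hck hlx.symm
      have : [k].count x = 0 := List.count_eq_zero.mpr (by simp [hxk])
      simp [List.count_append, this]
  · rw [if_neg hmem, List.filter_append]
    by_cases hck : c = PySem.Str.len k
    · rw [if_pos hck]
      have : [k].filter (fun x => PySem.Str.len x = c) = [k] := by simp [hck]
      rw [this, List.foldl_append, List.foldl_cons, List.foldl_nil, hcntk]
      have hz : (keys.count k : Int) = 0 := by
        simp [List.count_eq_zero.mpr hmem]
      have hcong : ∀ a, ((PySem.Set.ofList keys).filter (fun x => PySem.Str.len x = c)).foldl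
          (fun m x => max m (((keys ++ [k]).count x : Int))) a
            = ((PySem.Set.ofList keys).filter (fun x => PySem.Str.len x = c)).foldl
          (fun m x => max m ((keys.count x : Int))) a := by
        intro a
        refine foldl_max_count_congr _ _ _ ?_ a
        intro hx
        exact hmem ((PySem.Set.mem_ofList keys k).mp (List.mem_filter.mp hx).1)
      rw [hcong, hz]
    · rw [if_neg hck]
      have : [k].filter (fun x => PySem.Str.len x = c) = [] := by
        have : ¬ PySem.Str.len k = c := fun h => hck h.symm
        simp only [PySem.Str.len_eq, String.length_toList] at this
        simp [this]
      rw [this, List.append_nil]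
      refine foldl_max_count_congr _ _ _ ?_ 0
      intro hx
      exact hmem ((PySem.Set.mem_ofList keys k).mp (List.mem_filter.mp hx).1)

lemma maxA (pairs : List (Int × String)) (h : ∀ p ∈ pairs, PySem.Str.len p.2 = p.1)
    (mc0 : PySem.Dict Int Int) (h0 : ∀ c, mc0.getD c 0 = 0) (c : Int) :
    ((pairs.foldl pvStepA (PySem.Dict.empty, mc0)).2).getD c 0 = pvMaxAt (pairs.map Prod.snd) c := by
  induction pairs using List.reverseRecOn generalizing c with
  | nil => simp [pvMaxAt, PySem.Set.ofList, h0]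
  | append_singleton t p ih =>
    have ht : ∀ q ∈ t, PySem.Str.len q.2 = q.1 := fun q hq => h q (List.mem_append_left _ hq)
    have hp : PySem.Str.len p.2 = p.1 := h p (List.mem_append_right _ (List.mem_singleton_self p))
    rw [List.foldl_append, List.foldl_cons, List.foldl_nil, List.map_append, List.map_cons,
        List.map_nil, maxAt_append]
    show ((pvStepA (t.foldl pvStepA (PySem.Dict.empty, mc0)) p).2).getD c 0 = _
    rw [show (pvStepA (t.foldl pvStepA (PySem.Dict.empty, mc0)) p).2
          = (t.foldl pvStepA (PySem.Dict.empty, mc0)).2.insert p.1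
              (max ((t.foldl pvStepA (PySem.Dict.empty, mc0)).2.getD p.1 0)
                   ((t.foldl pvStepA (PySem.Dict.empty, mc0)).1.getD p.2 0 + 1)) from rfl,
        PySem.Dict.getD_insert, fstA_counter, PySem.Dict.getD_counter]
    by_cases hc : c = p.1
    · rw [if_pos hc, if_pos (hp ▸ hc), ih ht, hc]
    · rw [if_neg hc, if_neg (hp ▸ hc), ih ht]

lemma keysA_pairs (orders : List String) (course : List Int)
    (hpre : orders = [] ∨ ∀ c ∈ course, 0 ≤ c) :
    ∀ p ∈ pvPairs orders course, PySem.Str.len p.2 = p.1 := by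
  intro p hp
  unfold pvPairs at hp
  rw [List.mem_flatMap] at hp
  obtain ⟨c, hc, hp⟩ := hp
  rw [List.mem_flatMap] at hp
  obtain ⟨o, ho, hp⟩ := hp
  rw [List.mem_map] at hp
  obtain ⟨k, hk, rfl⟩ := hp
  have hcnn : 0 ≤ c := by
    rcases hpre with h | h
    · subst h; simp at ho
    · exact h c hc
  unfold pvGen at hk
  by_cases hlen : PySem.Str.len o < c
  · rw [if_pos hlen] at hk; simp at hk
  · rw [if_neg hlen] at hk
    rw [List.mem_map] at hk
    obtain ⟨comb, hcomb, rfl⟩ := hk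
    have hlenc := PySem.List.length_of_mem_combinations hcomb
    show PySem.Str.len (String.ofList comb) = c
    rw [PySem.Str.len_eq, String.toList_ofList, hlenc]
    omega

-- ---- B side: the pool is exactly A's key stream ----

lemma foldl_append_flat {α β : Type} (l : List α) (f : α → List β) (a : List β) :
    l.foldl (fun acc x => acc ++ f x) a = a ++ l.flatMap f := by
  induction l generalizing a with
  | nil => simp
  | cons x t ih => simp [ih, List.append_assoc]

lemma pool_eq (orders : List String) (course : List Int) :
    course.foldl (fun pool c =>
      orders.foldl (fun pool order =>
        if c ≤ PySem.Str.len order then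
          pool ++ (PySem.List.combinations (PySem.List.sorted order.toList (fun x => x)) c.toNat).map String.ofList
        else pool) pool) ([] : List String)
    = pvKeysA orders course := by
  have hstep : ∀ (a : List String) (c : Int),
      orders.foldl (fun pool order =>
        if c ≤ PySem.Str.len order then
          pool ++ (PySem.List.combinations (PySem.List.sorted order.toList (fun x => x)) c.toNat).map String.ofList
        else pool) a = a ++ orders.flatMap (fun o => pvGen c o) := by
    intro a c
    rw [← foldl_append_flat]
    refine PySem.List.foldl_congr_mem _ _ _ _ ?_
    intro acc o _
    by_cases h : c ≤ PySem.Str.len o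
    · rw [if_pos h, pvGen, if_neg (by omega : ¬ PySem.Str.len o < c)]
    · rw [if_neg h, pvGen, if_pos (by omega : PySem.Str.len o < c), List.append_nil]
  have : course.foldl (fun pool c =>
      orders.foldl (fun pool order =>
        if c ≤ PySem.Str.len order then
          pool ++ (PySem.List.combinations (PySem.List.sorted order.toList (fun x => x)) c.toNat).map String.ofList
        else pool) pool) ([] : List String)
      = course.foldl (fun pool c => pool ++ orders.flatMap (fun o => pvGen c o)) [] := by
    refine PySem.List.foldl_congr_mem _ _ _ _ ?_
    intro acc c _
    exact hstep acc c
  rw [this, foldl_append_flat, List.nil_append]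
  unfold pvKeysA pvPairs
  simp [List.map_flatMap, List.map_map, Function.comp_def]

-- ---- run-scan characterisation ----

lemma mem_dropWhile_lt (x : String) (xs : List String)
    (hs : xs.Pairwise (· ≤ ·)) (hge : ∀ y ∈ xs, x ≤ y) :
    ∀ y ∈ xs.dropWhile (fun y => y == x), x < y := by
  induction xs with
  | nil => simp
  | cons a t ih =>
    intro y hy
    rw [List.dropWhile_cons] at hy
    by_cases hax : (a == x) = true
    · rw [if_pos hax] at hy
      exact ih hs.of_cons (fun z hz => hge z (List.mem_cons_of_mem a hz)) y hy
    · rw [if_neg hax] at hy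
      have hxa : x < a := lt_of_le_of_ne (hge a List.mem_cons_self) (by
        intro h; exact hax (by simp [h.symm]))
      rcases List.mem_cons.mp hy with rfl | hyt
      · exact hxa
      · exact lt_of_lt_of_le hxa ((List.pairwise_cons.mp hs).1 y hyt)

lemma foldl_add_cons (l : List String) (x : String) (s : List String) (hx : x ∉ l) :
    l.foldl PySem.Set.add (x :: s) = x :: l.foldl PySem.Set.add s := by
  induction l generalizing s with
  | nil => rfl
  | cons a t ih =>
    have hax : a ≠ x := fun h => hx (h ▸ List.mem_cons_self)
    have hxt : x ∉ t := fun h => hx (List.mem_cons_of_mem a h)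
    have hc : PySem.Set.contains (x :: s) a = PySem.Set.contains s a := by
      simp [PySem.Set.contains, hax]
    simp only [List.foldl_cons, PySem.Set.add, hc]
    by_cases hmem : PySem.Set.contains s a = true
    · rw [if_pos hmem, if_pos hmem]; exact ih s hxt
    · rw [if_neg hmem, if_neg hmem]
      show List.foldl PySem.Set.add (x :: (s ++ [a])) t = _
      exact ih (s ++ [a]) hxt

lemma ofList_run (x : String) (t r : List String)
    (ht : ∀ y ∈ t, y = x) (hr : x ∉ r) :
    (PySem.Set.ofList (x :: (t ++ r)) : List String) = x :: PySem.Set.ofList r := by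
  show List.foldl PySem.Set.add PySem.Set.empty (x :: (t ++ r)) = _
  rw [List.foldl_cons]
  have h1 : PySem.Set.add PySem.Set.empty x = [x] := rfl
  rw [h1, List.foldl_append]
  have h2 : t.foldl PySem.Set.add [x] = [x] := by
    induction t with
    | nil => rfl
    | cons a s ih =>
      have ha : a = x := ht a List.mem_cons_self
      have : PySem.Set.add [x] a = [x] := by
        simp [PySem.Set.add, ha]
      rw [List.foldl_cons, this]
      exact ih (fun y hy => ht y (List.mem_cons_of_mem a hy))
  rw [h2]
  exact foldl_add_cons r x [] hr

lemma count_run (x : String) (t r : List String)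
    (ht : ∀ y ∈ t, y = x) (hr : x ∉ r) :
    ((x :: (t ++ r)).count x : Int) = (t.length : Int) + 1 := by
  have h1 : t.count x = t.length := by
    rw [List.count_eq_length]
    intro y hy; simpa using (ht y hy).symm
  have h2 : r.count x = 0 := List.count_eq_zero.mpr hr
  simp [List.count_append, h1, h2]

lemma count_tail (x : String) (t r : List String) (k : String)
    (ht : ∀ y ∈ t, y = x) (hk : k ≠ x) :
    (x :: (t ++ r)).count k = r.count k := by
  have h1 : t.count k = 0 := List.count_eq_zero.mpr (fun h => hk (ht k h))
  simp [List.count_append, h1, Ne.symm hk]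

lemma runScan_eq (l : List String) (h : l.Pairwise (· ≤ ·)) :
    pvRunScan l = (PySem.Set.ofList l : List String).map (fun k => (k, (l.count k : Int))) := by
  induction l using pvRunScan.induct with
  | case1 => simp [pvRunScan]
  | case2 x xs ih =>
    set t := xs.takeWhile (fun y => y == x) with htdef
    set r := xs.dropWhile (fun y => y == x) with hrdef
    have hxs : xs = t ++ r := (List.takeWhile_append_dropWhile).symm
    have ht : ∀ y ∈ t, y = x := by
      intro y hy
      have := List.mem_takeWhile_imp hy
      simpa using this
    have hpxs : xs.Pairwise (· ≤ ·) := h.of_cons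
    have hge : ∀ y ∈ xs, x ≤ y := (List.pairwise_cons.mp h).1
    have hrlt : ∀ y ∈ r, x < y := mem_dropWhile_lt x xs hpxs hge
    have hr : x ∉ r := fun hm => lt_irrefl x (hrlt x hm)
    have hpr : r.Pairwise (· ≤ ·) := hpxs.sublist (List.dropWhile_sublist _)
    rw [pvRunScan]
    rw [show x :: xs = x :: (t ++ r) by rw [← hxs]] at *
    rw [ofList_run x t r ht hr, List.map_cons, ih hpr]
    congr 1
    · congr 1
      rw [← count_run x t r ht hr]
    · refine List.map_congr_left ?_
      intro k hk
      have hkr : k ∈ r := (PySem.Set.mem_ofList r k).mp hk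
      have hkx : k ≠ x := fun h' => lt_irrefl x (h' ▸ hrlt k hkr)
      rw [count_tail x t r k ht hkx]

lemma runScan_keys_lt (l : List String) (h : l.Pairwise (· ≤ ·)) :
    (pvRunScan l).Pairwise (fun p q => p.1 < q.1) := by
  induction l using pvRunScan.induct with
  | case1 => simp [pvRunScan]
  | case2 x xs ih =>
    have hpxs : xs.Pairwise (· ≤ ·) := h.of_cons
    have hge : ∀ y ∈ xs, x ≤ y := (List.pairwise_cons.mp h).1
    have hrlt := mem_dropWhile_lt x xs hpxs hge
    have hpr : (xs.dropWhile (fun y => y == x)).Pairwise (· ≤ ·) :=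
      hpxs.sublist (List.dropWhile_sublist _)
    rw [pvRunScan, List.pairwise_cons]
    refine ⟨?_, ih hpr⟩
    intro q hq
    have : q.1 ∈ xs.dropWhile (fun y => y == x) := by
      have hmap := runScan_eq _ hpr
      have : q ∈ (PySem.Set.ofList (xs.dropWhile (fun y => y == x)) : List String).map
          (fun k => (k, ((xs.dropWhile (fun y => y == x)).count k : Int))) := hmap ▸ hq
      obtain ⟨k, hk, rfl⟩ := List.mem_map.mp this
      exact (PySem.Set.mem_ofList _ k).mp hk
    exact hrlt _ this

-- ---- best dict = pvMaxAt ----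

lemma bestFold (items : List (String × Int)) (b : PySem.Dict Int Int) (c : Int) :
    ((items.foldl pvStepBest b).getD c 0) =
      (items.filter (fun p => PySem.Str.len p.1 = c)).foldl (fun m p => max m p.2) (b.getD c 0) := by
  induction items generalizing b with
  | nil => simp
  | cons p t ih =>
    rw [List.foldl_cons, ih, List.filter_cons]
    have hstep : (pvStepBest b p).getD c 0 =
        if PySem.Str.len p.1 = c then max (b.getD c 0) p.2 else b.getD c 0 := by
      unfold pvStepBest
      by_cases hlt : b.getD (PySem.Str.len p.1) 0 < p.2
      · rw [if_pos hlt, PySem.Dict.getD_insert]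
        by_cases hc : c = PySem.Str.len p.1
        · rw [if_pos hc, if_pos hc.symm]
          subst hc; omega
        · rw [if_neg hc, if_neg (fun h => hc h.symm)]
      · rw [if_neg hlt]
        by_cases hc : PySem.Str.len p.1 = c
        · rw [if_pos hc]; subst hc; omega
        · rw [if_neg hc]
    rw [hstep]
    by_cases hc : PySem.Str.len p.1 = c
    · simp only [hc, decide_true, if_pos, List.foldl_cons]
    · simp only [hc, decide_false, Bool.false_eq_true, if_false]

lemma items_counter_perm (k1 k2 : List String) (h : k1.Perm k2) :
    (PySem.Dict.counter k1).items.Perm (PySem.Dict.counter k2).items := by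
  rw [PySem.Dict.items_counter, PySem.Dict.items_counter]
  have hS : (PySem.Set.ofList k1 : List String).Perm (PySem.Set.ofList k2) := by
    rw [List.perm_ext_iff_of_nodup (PySem.Set.nodup_ofList _) (PySem.Set.nodup_ofList _)]
    intro a
    rw [PySem.Set.mem_ofList, PySem.Set.mem_ofList]
    exact h.mem_iff
  have : (fun k => (k, (k2.count k : Int))) = fun k => (k, (k1.count k : Int)) := by
    funext k
    rw [h.count_eq]
  rw [this]
  exact hS.map _

lemma runScan_perm_counter (K : List String) :
    (pvRunScan (PySem.List.sorted K (fun x => x))).Perm (PySem.Dict.counter K).items := by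
  set S := PySem.List.sorted K (fun x => x) with hS
  have hsp : S.Pairwise (· ≤ ·) := PySem.List.sorted_pairwise K (fun x => x)
  have hperm : S.Perm K := PySem.List.sorted_perm K (fun x => x) false
  rw [runScan_eq S hsp]
  have : (PySem.Set.ofList S : List String).map (fun k => (k, (S.count k : Int)))
      = (PySem.Dict.counter S).items := (PySem.Dict.items_counter S).symm
  rw [this]
  exact items_counter_perm S K hperm

lemma best_runScan (K : List String) (c : Int) :
    (((pvRunScan (PySem.List.sorted K (fun x => x))).foldl pvStepBest PySem.Dict.empty).getD c 0)
      = pvMaxAt K c := by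
  rw [bestFold, PySem.Dict.getD_empty]
  have hperm := (runScan_perm_counter K).filter (fun p => PySem.Str.len p.1 = c)
  have := List.Perm.foldl_eq (f := fun (m : Int) (p : String × Int) => max m p.2)
    (rcomm := ⟨fun b a₁ a₂ => by omega⟩) hperm (0 : Int)
  rw [this, PySem.Dict.items_counter, List.filter_map, List.foldl_map]
  unfold pvMaxAt
  congr 1

-- ---- final assembly ----

theorem pv_main_eq (orders : List String) (course : List Int)
    (hpre : orders = [] ∨ ∀ c ∈ course, 0 ≤ c) :
    solution orders course = solution_alt orders course := by
  set K := pvKeysA orders course with hK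
  have hpairs := keysA_pairs orders course hpre
  -- A's side: sorted filter over counter items with pvMaxAt
  rw [portA_fold]
  simp only [fstA_counter, maxA _ hpairs _ (mc0_zero course)]
  -- B's side
  show _ = solution_alt orders course
  unfold solution_alt
  rw [pool_eq]
  rw [show (fun (best : PySem.Dict Int Int) (p : String × Int) =>
      if best.getD (PySem.Str.len p.1) 0 < p.2 then best.insert (PySem.Str.len p.1) p.2 else best)
      = pvStepBest from rfl]
  simp only [best_runScan]
  -- unify the two predicates
  have hfun : (fun p : String × Int =>
      if 2 ≤ p.2 ∧ pvMaxAt (pvKeysA orders course) (PySem.Str.len p.1) = p.2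
      then some p.1 else none)
      = (fun p : String × Int =>
      if 2 ≤ p.2 ∧ p.2 = pvMaxAt (pvKeysA orders course) (PySem.Str.len p.1)
      then some p.1 else none) := by
    funext p
    exact if_congr (and_congr Iff.rfl eq_comm) rfl rfl
  rw [show (pvPairs orders course).map Prod.snd = pvKeysA orders course from rfl, hfun]
  refine PySem.List.sorted_eq_of_perm_of_pairwise_lt _ _ _ ?_ ?_
  · exact List.Perm.filterMap _ (runScan_perm_counter (pvKeysA orders course))
  · rw [List.pairwise_filterMap]
    have hlt := runScan_keys_lt (PySem.List.sorted (pvKeysA orders course) (fun x => x))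
      (PySem.List.sorted_pairwise _ _)
    refine hlt.imp ?_
    intro p q hpq b hb b' hb'
    have hbp : b = p.1 := by
      by_cases hc : 2 ≤ p.2 ∧ p.2 = pvMaxAt (pvKeysA orders course) (PySem.Str.len p.1)
      · rw [if_pos hc] at hb; exact (Option.some_injective _ hb).symm
      · rw [if_neg hc] at hb; cases hb
    have hbq : b' = q.1 := by
      by_cases hc : 2 ≤ q.2 ∧ q.2 = pvMaxAt (pvKeysA orders course) (PySem.Str.len q.1)
      · rw [if_pos hc] at hb'; exact (Option.some_injective _ hb').symm
      · rw [if_neg hc] at hb'; cases hb'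
    rw [hbp, hbq]
    exact hpq

-- ===== VERDICT (by name: the statement is the Claim_ definition above) =====
theorem solution_spec : Claim_equal_solution := by
  intro orders course _ hpre
  show solution orders course = solution_alt orders course
  exact pv_main_eq orders course hpre
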